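-- pv_equiv track=rewrite | github.com/bempp/kifmm | hpc/archer2/data/ijhpca/make_slurm_strong_scaling.py | global_depth
-- ===== SOURCE A (Python) =====
-- def global_depth(rank):
--     """
--     will return the first power of 8 greater than rank, the power corresponding to the level
--     """
--     level = 1
--     loop = True
--
--     while loop:
--
--         if rank <= 8**level:
--             loop = False
--             result = level
--         else:
--             level += 1
--
--     return result
-- ===== SOURCE B (Python) =====
-- def global_depth(rank):
--     """
--     will return the first power of 8 greater than rank, the power corresponding to the level
--     """
--     if rank <= 8:
--         return 1
--     m = (rank - 1).bit_length()
--     return -(-m // 3)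
-- ===== Notes on version B (the rewrite author's own statement) =====
-- stated objective: simpler
-- what changed: Replaced the level-scanning while loop with a closed form: since 8**level = 2**(3*level), the answer is ceil(bit_length(rank-1)/3) (floored at 1 by the rank<=8 guard).
import Mathlib
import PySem

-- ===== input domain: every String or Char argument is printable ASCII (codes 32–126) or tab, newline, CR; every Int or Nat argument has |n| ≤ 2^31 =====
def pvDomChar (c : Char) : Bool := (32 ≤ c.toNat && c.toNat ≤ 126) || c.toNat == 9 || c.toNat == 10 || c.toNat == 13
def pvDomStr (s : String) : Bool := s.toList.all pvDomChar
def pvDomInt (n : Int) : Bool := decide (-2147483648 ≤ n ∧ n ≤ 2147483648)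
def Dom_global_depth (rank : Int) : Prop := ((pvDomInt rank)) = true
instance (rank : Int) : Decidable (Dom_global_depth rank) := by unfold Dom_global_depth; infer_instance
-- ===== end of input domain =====

-- B replaces A's level-scanning while loop by a closed form via bit_length (objective: simpler).

-- ===== PORT A =====
-- termination helper for the while loop: once 8^level < rank, level stays below rank
theorem pv_lt_eight_pow (l : Nat) : (l : Int) < (8 : Int) ^ l := by
  have h1 : l < 8 ^ l := Nat.lt_pow_self (by norm_num)
  exact_mod_cast h1

-- the while loop of A: loop until rank ≤ 8**level, incrementing level
def gdLoop (rank : Int) (level : Nat) : Int :=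
  if rank ≤ (8 : Int) ^ level then (level : Int)
  else gdLoop rank (level + 1)
termination_by rank.toNat + 1 - level
decreasing_by
  rename_i h
  have h2 : (level : Int) < rank := lt_trans (pv_lt_eight_pow level) (by omega)
  omega

def global_depth (rank : Int) : Int := gdLoop rank 1

-- ===== PORT B =====
-- (rank-1).bit_length() ported as PySem.Int.bitLength; -(-m // 3) ported with PySem.Int.floordiv
def global_depth_alt (rank : Int) : Int :=
  if rank ≤ 8 then 1
  else
    let m : Nat := PySem.Int.bitLength (rank - 1);
    -(PySem.Int.floordiv (-(m : Int)) 3)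

-- ===== PRECONDITION & SPEC =====
def Spec_global_depth (rank : Int) (out : Int) : Prop := out = global_depth_alt rank
instance (rank : Int) (out : Int) : Decidable (Spec_global_depth rank out) := by unfold Spec_global_depth; infer_instance

-- ===== CLAIM (what is proved, stated in full; the proofs are below) =====
def Claim_equal_global_depth : Prop := ∀ (rank : Int), Dom_global_depth rank → Spec_global_depth rank (global_depth rank)

-- ===== LEMMAS AND PROOFS =====

-- A's loop returns k as soon as k is the first level with rank ≤ 8^k
theorem gdLoop_eq (rank : Int) (k : Nat) (hk : rank ≤ (8 : Int) ^ k)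
    (hlt : ∀ j, j < k → (8 : Int) ^ j < rank) :
    ∀ d l, l ≤ k → k - l = d → gdLoop rank l = (k : Int) := by
  intro d
  induction d with
  | zero =>
    intro l hl hd
    have hlk : l = k := by omega
    subst hlk
    unfold gdLoop
    rw [if_pos hk]
  | succ d ih =>
    intro l hl hd
    have hlk : l < k := by omega
    unfold gdLoop
    rw [if_neg (not_le.2 (hlt l hlk))]
    exact ih (l + 1) (by omega) (by omega)

-- ===== VERDICT (by name: the statement is the Claim_ definition above) =====
theorem global_depth_spec : Claim_equal_global_depth := by
  intro rank _
  unfold Spec_global_depth global_depth global_depth_alt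
  by_cases h8 : rank ≤ 8
  · rw [if_pos h8]
    unfold gdLoop
    rw [if_pos (by simpa using h8)]
    norm_num
  · rw [if_neg h8]
    replace h8 : 8 < rank := by omega
    have hpos : (0 : Int) < rank - 1 := by omega
    set m : Nat := PySem.Int.bitLength (rank - 1) with hmdef
    set k : Int := -(PySem.Int.floordiv (-(m : Int)) 3) with hkdef
    -- bit_length brackets: 2^(m-1) ≤ rank-1 < 2^m
    have hub : (rank - 1).natAbs < 2 ^ m := PySem.Int.lt_two_pow_bitLength (rank - 1)
    have hlb : 2 ^ (m - 1) ≤ (rank - 1).natAbs := PySem.Int.two_pow_bitLength_le (rank - 1) (by omega)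
    have hcast : ((rank - 1).natAbs : Int) = rank - 1 := Int.natAbs_of_nonneg (by omega)
    have hubI : rank - 1 < (2 : Int) ^ m := by exact_mod_cast (hcast ▸ (by exact_mod_cast hub : ((rank - 1).natAbs : Int) < ((2 ^ m : Nat) : Int)))
    have hlbI : (2 : Int) ^ (m - 1) ≤ rank - 1 := by exact_mod_cast (hcast ▸ (by exact_mod_cast hlb : (((2 : Nat) ^ (m - 1) : Nat) : Int) ≤ ((rank - 1).natAbs : Int)))
    -- m ≥ 4 since rank - 1 ≥ 8
    have hm4 : 4 ≤ m := by
      by_contra hc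
      have hm3 : m ≤ 3 := by omega
      have : (2 : Nat) ^ m ≤ 2 ^ 3 := Nat.pow_le_pow_right (by norm_num) hm3
      omega
    -- the ceiling-division brackets for k : (k-1)*3 < m ≤ k*3
    have hk := (PySem.Int.neg_floordiv_neg_eq_iff_of_pos (a := (m : Int)) (b := 3) (q := k) (by norm_num)).1 hkdef.symm
    set kN : Nat := k.toNat with hkN
    have hkc : (kN : Int) = k := by omega
    have hbr : m ≤ 3 * kN ∧ 3 * (kN - 1) ≤ m - 1 ∧ 1 ≤ kN := by omega
    -- rank ≤ 8^kN
    have hA : rank ≤ (8 : Int) ^ kN := by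
      have h1 : ((2 : Int) ^ 3) ^ kN = 2 ^ (3 * kN) := (pow_mul 2 3 kN).symm
      have h2 : (2 : Int) ^ m ≤ 2 ^ (3 * kN) := pow_le_pow_right₀ (by norm_num) hbr.1
      have : (8 : Int) ^ kN = 2 ^ (3 * kN) := by norm_num at h1 ⊢; exact h1
      omega
    -- 8^j < rank for j < kN
    have hB : ∀ j, j < kN → (8 : Int) ^ j < rank := by
      intro j hj
      have h1 : ((2 : Int) ^ 3) ^ j = 2 ^ (3 * j) := (pow_mul 2 3 j).symm
      have h2 : (2 : Int) ^ (3 * j) ≤ 2 ^ (m - 1) := pow_le_pow_right₀ (by norm_num) (by omega)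
      have : (8 : Int) ^ j = 2 ^ (3 * j) := by norm_num at h1 ⊢; exact h1
      omega
    have := gdLoop_eq rank kN hA hB (kN - 1) 1 (by omega) (by omega)
    omega
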